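-- pv_equiv track=rewrite | github.com/dmitriy-dokshin/algorithmic_toolbox | Dynamic Programming/Partitioning Souvenirs/partition_souvenirs.py | partition_n_recursive_impl
-- ===== SOURCE A (Python) =====
-- def partition_n_recursive_impl(values, n, sums):
--     if n == 0:
--         return all(x == 0 for x in sums)
--
--     for i in range(0, len(sums)):
--         if sums[i] >= values[n - 1]:
--             sums[i] -= values[n - 1]
--             if partition_n_recursive_impl(values, n - 1, sums):
--                 return True
--             else:
--                 sums[i] += values[n - 1]
--
--     return partition_n_recursive_impl(values, n - 1, sums)
-- ===== SOURCE B (Python) =====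
-- def partition_n_recursive_impl(values, n, sums):
--     # Iterative forward search over the set of reachable residual tuples:
--     # each value, taken from index n-1 down to 0, is either skipped or
--     # subtracted from one bucket whose residual is >= the value.
--     # NOTE: unlike A, B does not mutate `sums`; equivalence is about the
--     # return value only.
--     states = {tuple(sums)}
--     for k in range(n - 1, -1, -1):
--         v = values[k]
--         new_states = set()
--         for s in states:
--             new_states.add(s)
--             for i in range(len(s)):
--                 if s[i] >= v:
--                     new_states.add(s[:i] + (s[i] - v,) + s[i + 1:])
--         states = new_states
--     return (0,) * len(sums) in states
-- ===== Notes on version B (the rewrite author's own statement) =====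
-- stated objective: alternative
-- what changed: Replaced A's backtracking recursion (which mutates sums in place and restores on failure) by an iterative forward search that keeps the deduplicated set of reachable residual tuples, processing values[n-1..0] in one pass; equivalence concerns the return value only since A mutates its sums argument.
-- outside the precondition, e.g. on partition_n_recursive_impl([], 1, []): A returns True, B raises IndexError
import Mathlib
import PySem

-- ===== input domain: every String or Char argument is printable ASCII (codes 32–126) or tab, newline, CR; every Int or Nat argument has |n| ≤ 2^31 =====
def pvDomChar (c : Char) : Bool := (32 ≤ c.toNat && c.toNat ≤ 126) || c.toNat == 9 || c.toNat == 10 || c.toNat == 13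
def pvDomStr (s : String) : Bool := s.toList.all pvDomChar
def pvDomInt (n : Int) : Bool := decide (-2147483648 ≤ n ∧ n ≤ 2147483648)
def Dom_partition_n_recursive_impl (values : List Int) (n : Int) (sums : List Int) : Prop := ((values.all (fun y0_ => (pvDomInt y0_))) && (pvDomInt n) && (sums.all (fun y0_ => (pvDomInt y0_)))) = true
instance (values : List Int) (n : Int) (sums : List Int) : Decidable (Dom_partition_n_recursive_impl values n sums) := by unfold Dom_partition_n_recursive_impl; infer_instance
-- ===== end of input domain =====

-- B replaces A's backtracking recursion (which mutates `sums` in place and restores on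
-- failure; the equivalence is about the return value only — B never mutates) by an
-- iterative one-pass search over the set of reachable residual tuples.

-- ===== PORT A =====
-- A's recursion, value-passing: on every False return A has restored `sums`, so each trial
-- passes the list with only bucket i reduced; the final fall-through call uses the original list.
-- Fuel is n.toNat: for n < 0 the Python never reaches its base case and raises (outside Pre_).
def pvAgo (values : List Int) : Nat → List Int → Bool
  | 0, sums => sums.all (fun x => x == 0)
  | k + 1, sums =>
    let v := values.getD k 0   -- values[n-1]; exact under Pre_ (0 ≤ n-1 < len values)
    if (List.range sums.length).any
        (fun i => decide (sums.getD i 0 ≥ v) && pvAgo values k (sums.set i (sums.getD i 0 - v))) then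
      true
    else
      pvAgo values k sums

def partition_n_recursive_impl (values : List Int) (n : Int) (sums : List Int) : Bool :=
  pvAgo values n.toNat sums

-- ===== PORT B =====
-- one processing step for value v: every state is kept (skip) and every allowed reduction is added
def pvStep (v : Int) (states : PySem.Set (List Int)) : PySem.Set (List Int) :=
  states.foldl
    (fun ns s =>
      (List.range s.length).foldl
        (fun ns i =>
          if s.getD i 0 ≥ v then PySem.Set.add ns (s.set i (s.getD i 0 - v)) else ns)
        (PySem.Set.add ns s))
    PySem.Set.empty

def partition_n_recursive_impl_alt (values : List Int) (n : Int) (sums : List Int) : Bool :=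
  PySem.Set.contains
    ((PySem.List.pyRange (n - 1) (-1) (-1)).foldl
      (fun states k => pvStep (PySem.List.pyGetD values k 0) states)
      (PySem.Set.ofList [sums]))
    (List.replicate sums.length 0)

-- ===== PRECONDITION & SPEC =====
-- Pre_ excludes n outside [0, len(values)]: there A raises (IndexError on values[n-1], or
-- unbounded recursion for n < 0) except in the corner n > len(values) with sums == [], where
-- A returns True through n levels of recursion while B's index loop raises IndexError.
def Pre_partition_n_recursive_impl (values : List Int) (n : Int) (sums : List Int) : Prop :=
  0 ≤ n ∧ n ≤ values.length
instance (values : List Int) (n : Int) (sums : List Int) : Decidable (Pre_partition_n_recursive_impl values n sums) := by unfold Pre_partition_n_recursive_impl; infer_instance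
def pvWitness_partition_n_recursive_impl : List Int × Int × List Int := ([1, 2, 3], 3, [3, 3])

def Spec_partition_n_recursive_impl (values : List Int) (n : Int) (sums : List Int) (out : Bool) : Prop := out = partition_n_recursive_impl_alt values n sums
instance (values : List Int) (n : Int) (sums : List Int) (out : Bool) : Decidable (Spec_partition_n_recursive_impl values n sums out) := by unfold Spec_partition_n_recursive_impl; infer_instance

-- ===== CLAIM (what is proved, stated in full; the proofs are below) =====
def Claim_equal_partition_n_recursive_impl : Prop := ∀ (values : List Int) (n : Int) (sums : List Int), Dom_partition_n_recursive_impl values n sums → Pre_partition_n_recursive_impl values n sums → Spec_partition_n_recursive_impl values n sums (partition_n_recursive_impl values n sums)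

-- ===== LEMMAS AND PROOFS =====

-- membership in the inner (bucket) fold of pvStep
theorem pv_mem_inner (s : List Int) (v : Int) :
    ∀ (l : List Nat) (ns : PySem.Set (List Int)) (t : List Int),
      (t ∈ l.foldl
          (fun ns i =>
            if s.getD i 0 ≥ v then PySem.Set.add ns (s.set i (s.getD i 0 - v)) else ns) ns)
        ↔ t ∈ ns ∨ ∃ i ∈ l, s.getD i 0 ≥ v ∧ t = s.set i (s.getD i 0 - v) := by
  intro l
  induction l with
  | nil => simp
  | cons i l ih =>
    intro ns t
    simp only [List.foldl_cons]
    rw [ih]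
    by_cases h : s.getD i 0 ≥ v
    · simp only [if_pos h, PySem.Set.mem_add]
      constructor
      · rintro ((h1 | h1) | ⟨j, hj, h2, h3⟩)
        · exact Or.inl h1
        · exact Or.inr ⟨i, by simp, h, h1⟩
        · exact Or.inr ⟨j, by simp [hj], h2, h3⟩
      · rintro (h1 | ⟨j, hj, h2, h3⟩)
        · exact Or.inl (Or.inl h1)
        · rcases List.mem_cons.mp hj with rfl | hj
          · exact Or.inl (Or.inr h3)
          · exact Or.inr ⟨j, hj, h2, h3⟩
    · simp only [if_neg h]
      constructor
      · rintro (h1 | ⟨j, hj, h2, h3⟩)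
        · exact Or.inl h1
        · exact Or.inr ⟨j, by simp [hj], h2, h3⟩
      · rintro (h1 | ⟨j, hj, h2, h3⟩)
        · exact Or.inl h1
        · rcases List.mem_cons.mp hj with rfl | hj
          · exact absurd h2 h
          · exact Or.inr ⟨j, hj, h2, h3⟩

-- membership in pvStep: keep each state, plus every allowed one-bucket reduction
theorem pv_mem_step (v : Int) (S : List (List Int)) (t : List Int) :
    t ∈ pvStep v S ↔
      ∃ s ∈ S, t = s ∨ ∃ i < s.length, s.getD i 0 ≥ v ∧ t = s.set i (s.getD i 0 - v) := by
  unfold pvStep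
  suffices h : ∀ (S : List (List Int)) (ns : PySem.Set (List Int)),
      (t ∈ S.foldl
          (fun ns s =>
            (List.range s.length).foldl
              (fun ns i =>
                if s.getD i 0 ≥ v then PySem.Set.add ns (s.set i (s.getD i 0 - v)) else ns)
              (PySem.Set.add ns s)) ns)
        ↔ t ∈ ns ∨ ∃ s ∈ S, t = s ∨ ∃ i < s.length, s.getD i 0 ≥ v ∧ t = s.set i (s.getD i 0 - v) by
    rw [h]; simp [PySem.Set.empty]
  intro S
  induction S with
  | nil => simp
  | cons s S ih =>
    intro ns
    simp only [List.foldl_cons]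
    rw [ih, pv_mem_inner, PySem.Set.mem_add]
    simp only [List.mem_range, List.mem_cons]
    constructor
    · rintro (((h1 | h1) | ⟨i, hi, h2, h3⟩) | ⟨s', hs', h4⟩)
      · exact Or.inl h1
      · exact Or.inr ⟨s, Or.inl rfl, Or.inl h1⟩
      · exact Or.inr ⟨s, Or.inl rfl, Or.inr ⟨i, hi, h2, h3⟩⟩
      · exact Or.inr ⟨s', Or.inr hs', h4⟩
    · rintro (h1 | ⟨s', hs' | hs', h4⟩)
      · exact Or.inl (Or.inl (Or.inl h1))
      · subst hs'
        rcases h4 with h4 | ⟨i, hi, h2, h3⟩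
        · exact Or.inl (Or.inl (Or.inr h4))
        · exact Or.inl (Or.inr ⟨i, hi, h2, h3⟩)
      · exact Or.inr ⟨s', hs', h4⟩

-- pvStep preserves the length of every state
theorem pv_step_length (v : Int) (S : List (List Int)) (L : Nat)
    (h : ∀ s ∈ S, s.length = L) : ∀ t ∈ pvStep v S, t.length = L := by
  intro t ht
  rcases (pv_mem_step v S t).mp ht with ⟨s, hs, h1 | ⟨i, _, _, h3⟩⟩
  · rw [h1]; exact h s hs
  · rw [h3]; simp [h s hs]

-- a list of zeros of known length is the replicate
theorem pv_all_zero_iff (s : List Int) (L : Nat) (hL : s.length = L) :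
    s.all (fun x => x == 0) = true ↔ s = List.replicate L 0 := by
  rw [List.eq_replicate_iff, List.all_eq_true]
  constructor
  · intro h
    exact ⟨hL, fun b hb => eq_of_beq (h b hb)⟩
  · rintro ⟨-, h⟩ b hb
    exact beq_iff_eq.mpr (h b hb)

-- the downward index loop reads exactly values[n-1], …, values[0]
theorem pv_idx_list (values : List Int) (m : Nat) (hm : m ≤ values.length)
    (hmn : (m : Int) - 1 - (-1) = (m : Int)) :
    (PySem.List.pyRange ((m : Int) - 1) (-1) (-1)).map (fun i => PySem.List.pyGetD values i 0)
      = (values.take m).reverse := by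
  rw [PySem.List.pyRange_neg_one, hmn, Int.toNat_natCast, List.map_map]
  apply List.ext_getElem
  · simp [hm]
  · intro j h1 h2
    have hj : j < m := by simpa using h1
    simp only [List.getElem_map, List.getElem_range, Function.comp]
    have hv : PySem.List.pyGetD values ((m : Int) - 1 - (j : Int)) 0
        = values[((m : Int) - 1 - (j : Int)).toNat] := by
      apply PySem.List.pyGetD_eq_getElem
      · omega
      · omega
    rw [hv, List.getElem_reverse, List.getElem_take]
    congr 1
    simp only [List.length_take]
    omega

-- main invariant: the zero tuple is reachable from some state of S by processing
-- values[k-1], …, values[0] iff A's recursion succeeds from some state of S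
theorem pv_main (values : List Int) (L : Nat) :
    ∀ (k : Nat), k ≤ values.length → ∀ (S : List (List Int)), (∀ s ∈ S, s.length = L) →
      ((List.replicate L 0) ∈
          ((values.take k).reverse).foldl (fun states v => pvStep v states) S
        ↔ ∃ s ∈ S, pvAgo values k s = true) := by
  intro k
  induction k with
  | zero =>
    intro _ S hS
    simp only [List.take_zero, List.reverse_nil, List.foldl_nil, pvAgo]
    constructor
    · intro h
      exact ⟨List.replicate L 0, h, (pv_all_zero_iff _ L (by simp)).mpr rfl⟩
    · rintro ⟨s, hs, h⟩
      have hrep := (pv_all_zero_iff s L (hS s hs)).mp h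
      exact hrep ▸ hs
  | succ k ih =>
    intro hk S hS
    have hklt : k < values.length := by omega
    rw [List.take_succ, List.getElem?_eq_getElem hklt]
    simp only [Option.toList_some, List.reverse_append, List.reverse_singleton,
      List.singleton_append, List.foldl_cons]
    rw [ih (by omega) (pvStep values[k] S) (pv_step_length _ _ _ hS)]
    have hv : values.getD k 0 = values[k] := List.getD_eq_getElem values 0 hklt
    constructor
    · rintro ⟨s', hs', hgo⟩
      rcases (pv_mem_step _ S s').mp hs' with ⟨s, hs, h1 | ⟨i, hi, h2, h3⟩⟩
      · rw [h1] at hgo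
        refine ⟨s, hs, ?_⟩
        simp only [pvAgo, hv]
        split
        · rfl
        · exact hgo
      · rw [h3] at hgo
        refine ⟨s, hs, ?_⟩
        simp only [pvAgo, hv]
        rw [if_pos]
        rw [List.any_eq_true]
        refine ⟨i, List.mem_range.mpr hi, ?_⟩
        rw [Bool.and_eq_true, decide_eq_true_eq]
        exact ⟨h2, hgo⟩
    · rintro ⟨s, hs, hgo⟩
      simp only [pvAgo, hv] at hgo
      split at hgo
      · next hany =>
        rw [List.any_eq_true] at hany
        rcases hany with ⟨i, hi, hb⟩
        rw [List.mem_range] at hi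
        rw [Bool.and_eq_true, decide_eq_true_eq] at hb
        rcases hb with ⟨h2, h3⟩
        refine ⟨s.set i (s.getD i 0 - values[k]), ?_, h3⟩
        exact (pv_mem_step _ S _).mpr ⟨s, hs, Or.inr ⟨i, hi, h2, rfl⟩⟩
      · exact ⟨s, (pv_mem_step _ S s).mpr ⟨s, hs, Or.inl rfl⟩, hgo⟩
-- ===== VERDICT (by name: the statement is the Claim_ definition above) =====
theorem partition_n_recursive_impl_spec : Claim_equal_partition_n_recursive_impl := by
  intro values n sums _ hpre
  rcases hpre with ⟨hn0, hnlen⟩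
  obtain ⟨m, rfl⟩ : ∃ m : Nat, n = (m : Int) := ⟨n.toNat, (Int.toNat_of_nonneg hn0).symm⟩
  unfold Spec_partition_n_recursive_impl partition_n_recursive_impl partition_n_recursive_impl_alt
  rw [Int.toNat_natCast]
  have h0 : PySem.Set.ofList [sums] = ([sums] : List (List Int)) := by
    simp [PySem.Set.ofList, PySem.Set.add]
  have hk : m ≤ values.length := by omega
  have hfold :
      (PySem.List.pyRange ((m : Int) - 1) (-1) (-1)).foldl
          (fun states k => pvStep (PySem.List.pyGetD values k 0) states) [sums]
        = ((values.take m).reverse).foldl (fun states v => pvStep v states) [sums] := by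
    rw [← pv_idx_list values m hk (by omega), List.foldl_map]
  rw [Bool.eq_iff_iff, PySem.Set.contains_iff, h0, hfold]
  have hmain := pv_main values sums.length m hk [sums] (by simp)
  rw [hmain]
  simp
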